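-- pv_equiv track=rewrite | github.com/snwox/CGA_task | task1/manuscrpyt.py | decrypt_str
-- ===== SOURCE A (Python) =====
-- def decrypt_str(src):
-- 	dec=''
-- 	for c in list(src):
-- 		if c<105 or c > 112:
-- 			if c<114 or c > 121:
-- 				if c < 73 or c > 80:
-- 					if c >=82 and c <=89:
-- 						c-=9
-- 				else:
-- 					c+=9
-- 			else:
-- 				c-=9
-- 		else:
-- 			c+=9
-- 		dec+=chr(c)
-- 	return dec
-- ===== SOURCE B (Python) =====
-- # No code-point arithmetic at all: the cipher is given extensionally by two aligned
-- # literal alphabets (str.maketrans) and applied by str.translate after decoding once.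
-- _CIPHER = 'IJKLMNOPijklmnopRSTUVWXYrstuvwxy'
-- _PLAIN = 'RSTUVWXYrstuvwxyIJKLMNOPijklmnop'
--
--
-- def decrypt_str(src):
--     return ''.join(map(chr, src)).translate(str.maketrans(_CIPHER, _PLAIN))
-- ===== Notes on version B (the rewrite author's own statement) =====
-- stated objective: idiomatic
-- what changed: B performs no code-point arithmetic or range comparisons: it decodes the ints to a string in one pass and then applies a substitution defined extensionally by two aligned literal alphabets via str.maketrans/str.translate, replacing A's nested branch cascade with +/-9 shifts.
-- outside the precondition, e.g. on decrypt_str([-1]): A raises ValueError, B raises ValueError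
import Mathlib
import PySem

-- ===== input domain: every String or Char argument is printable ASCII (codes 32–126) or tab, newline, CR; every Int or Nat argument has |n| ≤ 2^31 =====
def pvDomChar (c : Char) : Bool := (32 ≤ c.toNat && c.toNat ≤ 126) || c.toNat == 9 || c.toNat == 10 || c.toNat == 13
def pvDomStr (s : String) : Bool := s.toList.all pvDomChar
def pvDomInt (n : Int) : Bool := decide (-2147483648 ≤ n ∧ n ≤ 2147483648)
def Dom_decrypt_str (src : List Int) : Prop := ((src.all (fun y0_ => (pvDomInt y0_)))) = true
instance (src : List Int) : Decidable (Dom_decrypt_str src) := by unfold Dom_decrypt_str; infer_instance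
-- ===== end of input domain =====

-- B does no code-point arithmetic: it decodes once, then applies a translate table given
-- extensionally by two aligned literal alphabets (idiomatic str.maketrans/str.translate).

-- chr(c): exact for 0 ≤ c ≤ 0x10FFFF and non-surrogate (guaranteed by Pre_decrypt_str)
def pvChr (c : Int) : Char := Char.ofNat c.toNat

-- ===== PORT A =====
def decrypt_str (src : List Int) : String :=
  String.mk (src.foldl (fun dec c =>
    let c :=
      if c < 105 ∨ c > 112 then
        if c < 114 ∨ c > 121 then
          if c < 73 ∨ c > 80 then
            if c ≥ 82 ∧ c ≤ 89 then c - 9 else c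
          else c + 9
        else c - 9
      else c + 9
    dec ++ [pvChr c]) [])

-- ===== PORT B =====
-- str.maketrans(_CIPHER, _PLAIN): char-keyed table from the two aligned literal alphabets
def pvTrans : PySem.Dict Char Char :=
  (List.zip "IJKLMNOPijklmnopRSTUVWXYrstuvwxy".toList
            "RSTUVWXYrstuvwxyIJKLMNOPijklmnop".toList).foldl
    (fun d p => d.insert p.1 p.2) PySem.Dict.empty

-- ''.join(map(chr, src)).translate(table)
def decrypt_str_alt (src : List Int) : String :=
  String.mk ((src.map pvChr).map (fun ch => pvTrans.getD ch ch))

-- ===== PRECONDITION & SPEC =====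
-- Pre_ excludes code points where Python's chr raises ValueError (c < 0 or c > 0x10FFFF)
-- and the surrogate range 0xD800–0xDFFF, where chr returns a lone-surrogate string that a
-- Lean String cannot represent (both programs behave identically there).
def Pre_decrypt_str (src : List Int) : Prop :=
  ∀ c ∈ src, 0 ≤ c ∧ c ≤ 1114111 ∧ ¬(55296 ≤ c ∧ c ≤ 57343)
instance (src : List Int) : Decidable (Pre_decrypt_str src) := by unfold Pre_decrypt_str; infer_instance
def pvWitness_decrypt_str : List Int := [73, 82, 105, 114, 65, 81, 90, 104, 113, 122]

def Spec_decrypt_str (src : List Int) (out : String) : Prop := out = decrypt_str_alt src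
instance (src : List Int) (out : String) : Decidable (Spec_decrypt_str src out) := by unfold Spec_decrypt_str; infer_instance

-- ===== CLAIM (what is proved, stated in full; the proofs are below) =====
def Claim_equal_decrypt_str : Prop := ∀ (src : List Int), Dom_decrypt_str src → Pre_decrypt_str src → Spec_decrypt_str src (decrypt_str src)

-- ===== LEMMAS AND PROOFS =====

-- on valid non-surrogate code points, pvChr's code is the code point itself
theorem pvChr_toNat (c : Int) (h0 : 0 ≤ c) (h1 : c ≤ 1114111)
    (hs : ¬(55296 ≤ c ∧ c ≤ 57343)) : (pvChr c).toNat = c.toNat := by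
  unfold pvChr
  have hv : Nat.isValidChar c.toNat := by
    unfold Nat.isValidChar
    omega
  rw [Char.ofNat, dif_pos hv]
  rcases hv with h | ⟨_, h⟩ <;>
    simp [Char.ofNatAux, UInt32.toNat_ofNatLT]

-- the translate-table lookup agrees with A's branch cascade on every admitted code point
theorem pvTrans_getD (c : Int) (h0 : 0 ≤ c) (h1 : c ≤ 1114111)
    (hs : ¬(55296 ≤ c ∧ c ≤ 57343)) :
    pvTrans.getD (pvChr c) (pvChr c) = pvChr
      (if c < 105 ∨ c > 112 then
        if c < 114 ∨ c > 121 then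
          if c < 73 ∨ c > 80 then
            if c ≥ 82 ∧ c ≤ 89 then c - 9 else c
          else c + 9
        else c - 9
      else c + 9) := by
  by_cases h : 73 ≤ c ∧ c ≤ 121
  · obtain ⟨ha, hb⟩ := h
    interval_cases c <;> decide
  · have hk : pvTrans.keys = "IJKLMNOPijklmnopRSTUVWXYrstuvwxy".toList := by decide
    have htn := pvChr_toNat c h0 h1 hs
    have hnc : pvTrans.contains (pvChr c) = false := by
      rw [PySem.Dict.contains_eq_decide_mem_keys, hk]
      simp only [decide_eq_false_iff_not]
      intro hmem
      have : (pvChr c).toNat ∈ ("IJKLMNOPijklmnopRSTUVWXYrstuvwxy".toList.map Char.toNat) :=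
        List.mem_map_of_mem hmem
      rw [htn] at this
      have hcodes : ("IJKLMNOPijklmnopRSTUVWXYrstuvwxy".toList.map Char.toNat) =
        [73,74,75,76,77,78,79,80,105,106,107,108,109,110,111,112,
         82,83,84,85,86,87,88,89,114,115,116,117,118,119,120,121] := by decide
      rw [hcodes] at this
      simp only [List.mem_cons, List.not_mem_nil, or_false] at this
      omega
    rw [PySem.Dict.getD_of_not_contains _ _ hnc]
    congr 1
    split_ifs <;> omega

-- ===== VERDICT (by name: the statement is the Claim_ definition above) =====
theorem decrypt_str_spec : Claim_equal_decrypt_str := by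
  intro src _ hpre
  unfold Spec_decrypt_str decrypt_str decrypt_str_alt
  rw [PySem.List.foldl_append_singleton_eq_map, List.map_map]
  congr 1
  refine List.map_congr_left fun c hc => ?_
  obtain ⟨h0, h1, hs⟩ := hpre c hc
  exact (pvTrans_getD c h0 h1 hs).symm
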